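-- pv_equiv track=rewrite | github.com/yehnan/python_book_yehnan | ch02ex/ch02ex2.7_answer.py | plateau
-- ===== SOURCE A (Python) =====
-- def plateau(data):
--     if len(data) == 0:
--         return None
--                               # 記錄到目前為止找到的最長平台
--     result_i_max = 0          # 一開始先把索引值0的元素當做最長平台
--     result_x_max = data[0]    # 記錄該平台的整數，最後會成為此函式的回傳
--     count_max = 1             # 該平台的長度，目前是1
--
--                               # 記錄目前正在處理中的平台
--     result_i = 0              # 從索引值0開始處理
--     result_x = data[0]        # 記錄該平台的整數
--     count = 1                 # 該平台的長度，目前是1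
--
--     for i in range(1, len(data)):  # 從索引值1開始
--         if data[i] == result_x:       # 若元素（整數）等於前一平台，該平台的長度加一
--             count += 1                 # 換句話說，該平台繼續延伸
--
--         else: # data[i] > result_x:   # 若大於，代表進入新的平台
--             result_i = i                   # 進入新的平台了，
--             result_x = data[i]             # 所以重新設定目前正在處理的平台
--             count = 1
--
--         if count > count_max:              # 記錄到目前為止，最長平台的資訊
--             result_i_max, result_x_max, count_max = result_i, result_x, count
--
--     return result_x_max                    # 此題目要求回傳result_x_max，
-- ===== SOURCE B (Python) =====
-- def plateau(data):
--     if not data: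
--         return None
--     runs = []  # list of (value, length) for each maximal run of equal elements
--     for x in data:
--         if runs and runs[-1][0] == x:
--             runs[-1] = (x, runs[-1][1] + 1)
--         else:
--             runs.append((x, 1))
--     return max(runs, key=lambda r: r[1])[0]
-- ===== Notes on version B (the rewrite author's own statement) =====
-- stated objective: idiomatic
-- what changed: A tracks best/current plateau with six running variables in one index loop; B first compresses data into (value, run-length) pairs and then takes max by length (first-on-tie), matching A's strict-greater update.
import Mathlib
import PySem

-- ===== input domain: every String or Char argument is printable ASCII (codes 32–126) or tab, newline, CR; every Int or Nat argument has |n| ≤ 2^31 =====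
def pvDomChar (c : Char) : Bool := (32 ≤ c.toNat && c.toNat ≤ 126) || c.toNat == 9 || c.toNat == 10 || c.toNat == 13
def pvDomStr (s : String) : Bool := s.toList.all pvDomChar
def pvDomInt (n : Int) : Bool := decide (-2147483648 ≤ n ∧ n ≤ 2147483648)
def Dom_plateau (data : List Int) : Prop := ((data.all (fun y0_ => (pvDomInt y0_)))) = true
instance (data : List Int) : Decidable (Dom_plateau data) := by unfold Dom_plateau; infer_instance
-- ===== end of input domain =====

-- B replaces A's six running variables with a run-length compression followed by a first-on-tie max by length (idiomatic; same cost).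

-- ===== PORT A =====
-- A's loop body: state (result_i_max, result_x_max, count_max, result_i, result_x, count), index i.
def plateauLoop (data : List Int) : (Int × Int × Int × Int × Int × Int) → Int → (Int × Int × Int × Int × Int × Int)
  | (rim, rxm, cm, ri, rx, c), i =>
    let x := PySem.List.pyGetD data i 0
    let t := if x = rx then (ri, rx, c + 1) else (i, x, 1)
    if t.2.2 > cm then (t.1, t.2.1, t.2.2, t.1, t.2.1, t.2.2) else (rim, rxm, cm, t.1, t.2.1, t.2.2)

def plateau (data : List Int) : Option Int :=
  if data.length = 0 then none
  else
    let x0 := PySem.List.pyGetD data 0 0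
    let s := (PySem.List.pyRange 1 (PySem.List.len data) 1).foldl (plateauLoop data) (0, x0, 1, 0, x0, 1)
    some s.2.1

-- ===== PORT B =====
-- one step of B's run-building loop: extend the last run or start a new one
def plateauRunsStep (runs : List (Int × Int)) (x : Int) : List (Int × Int) :=
  match runs.getLast? with
  | some r => if r.1 = x then runs.dropLast ++ [(x, r.2 + 1)] else runs ++ [(x, 1)]
  | none => runs ++ [(x, 1)]

def plateau_alt (data : List Int) : Option Int :=
  if data = [] then none
  else
    let runs := data.foldl plateauRunsStep []
    (PySem.List.max? runs (fun r => r.2)).map (fun r => r.1)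

-- ===== PRECONDITION & SPEC =====
def Spec_plateau (data : List Int) (out : Option Int) : Prop := out = plateau_alt data
instance (data : List Int) (out : Option Int) : Decidable (Spec_plateau data out) := by unfold Spec_plateau; infer_instance

-- ===== CLAIM (what is proved, stated in full; the proofs are below) =====
def Claim_equal_plateau : Prop := ∀ (data : List Int), Dom_plateau data → Spec_plateau data (plateau data)

-- ===== LEMMAS AND PROOFS =====

-- structural version of A's index loop (element passed explicitly)
def pvLoopS : (Int × Int × Int × Int × Int × Int) → Int → Int → (Int × Int × Int × Int × Int × Int)
  | (rim, rxm, cm, ri, rx, c), i, x =>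
    let t := if x = rx then (ri, rx, c + 1) else (i, x, 1)
    if t.2.2 > cm then (t.1, t.2.1, t.2.2, t.1, t.2.1, t.2.2) else (rim, rxm, cm, t.1, t.2.1, t.2.2)

def pvFoldIdx : List Int → Int → (Int × Int × Int × Int × Int × Int) → (Int × Int × Int × Int × Int × Int)
  | [], _, s => s
  | x :: l, i, s => pvFoldIdx l (i + 1) (pvLoopS s i x)

-- the step of PySem.List.max? with key (·.2)
def pvMaxStep (o : Option (Int × Int)) (r : Int × Int) : Option (Int × Int) :=
  match o with
  | none => some r
  | some m => if m.2 < r.2 then some r else some m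

theorem pv_max?_append (R : List (Int × Int)) (r : Int × Int) :
    PySem.List.max? (R ++ [r]) (fun p => p.2) = pvMaxStep (PySem.List.max? R (fun p => p.2)) r := by
  cases h : PySem.List.max? R (fun p => p.2) with
  | none =>
    unfold PySem.List.max? at h ⊢
    rw [List.foldl_append, h]
    rfl
  | some m =>
    unfold PySem.List.max? at h ⊢
    rw [List.foldl_append, h]
    rfl

theorem pv_bridge (l : List Int) : ∀ (data : List Int) (i : Int) (s : Int × Int × Int × Int × Int × Int),
    0 ≤ i → data.drop i.toNat = l →
    (PySem.List.pyRange i (PySem.List.len data) 1).foldl (plateauLoop data) s = pvFoldIdx l i s := by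
  induction l with
  | nil =>
    intro data i s hi hd
    have hlen : data.length ≤ i.toNat := List.drop_eq_nil_iff.mp hd
    rw [show PySem.List.len data = (data.length : Int) from rfl,
      PySem.List.pyRange_one_eq_nil (by omega)]
    rfl
  | cons x l ih =>
    intro data i s hi hd
    have hlt : i.toNat < data.length := by
      by_contra h
      rw [List.drop_eq_nil_iff.mpr (by omega)] at hd
      cases hd
    have h9 : data[i.toNat]? = some x := by
      have h0 : (data.drop i.toNat)[0]? = some x := by rw [hd]; rfl
      rwa [List.getElem?_drop, Nat.add_zero] at h0
    have hx : PySem.List.pyGetD data i 0 = x := by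
      rw [PySem.List.pyGetD_of_nonneg data 0 hi]
      simp [List.getD, h9]
    rw [show PySem.List.len data = (data.length : Int) from rfl,
      PySem.List.pyRange_one_cons (by omega), List.foldl_cons]
    have hstep : plateauLoop data s i = pvLoopS s i x := by
      obtain ⟨rim, rxm, cm, ri, rx, c⟩ := s
      simp [plateauLoop, pvLoopS, hx]
    rw [hstep, pvFoldIdx]
    apply ih data (i + 1) _ (by omega)
    rw [show (i + 1).toNat = i.toNat + 1 by omega, ← List.drop_drop, hd]
    rfl

theorem pv_main (l : List Int) : ∀ (i rim ri rxm cm rx c : Int) (R' : List (Int × Int)),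
    1 ≤ c →
    pvMaxStep (PySem.List.max? R' (fun p => p.2)) (rx, c) = some (rxm, cm) →
    some (pvFoldIdx l i (rim, rxm, cm, ri, rx, c)).2.1
      = (PySem.List.max? (List.foldl plateauRunsStep (R' ++ [(rx, c)]) l)
            (fun p => p.2)).map (fun r => r.1) := by
  induction l with
  | nil =>
    intro i rim ri rxm cm rx c R' hc hmax
    rw [List.foldl_nil, pvFoldIdx, pv_max?_append, hmax]
    rfl
  | cons x l ih =>
    intro i rim ri rxm cm rx c R' hc hmax
    have hcm : c ≤ cm := by
      cases hP : PySem.List.max? R' (fun p => p.2) with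
      | none => rw [hP] at hmax; simp [pvMaxStep] at hmax; omega
      | some m =>
        obtain ⟨mv, mk⟩ := m
        rw [hP] at hmax; simp only [pvMaxStep] at hmax
        split at hmax
        · simp at hmax; omega
        · simp at hmax; omega
    rw [List.foldl_cons, pvFoldIdx]
    by_cases hx : x = rx
    · -- the current run continues
      subst hx
      have hRS : plateauRunsStep (R' ++ [(x, c)]) x = R' ++ [(x, c + 1)] := by
        simp [plateauRunsStep]
      rw [hRS]
      by_cases hgt : c + 1 > cm
      · have hstep : pvLoopS (rim, rxm, cm, ri, x, c) i x =
            (ri, x, c + 1, ri, x, c + 1) := by simp [pvLoopS, hgt]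
        rw [hstep]
        apply ih _ _ _ _ _ _ _ _ (by omega)
        cases hP : PySem.List.max? R' (fun p => p.2) with
        | none => simp [pvMaxStep]
        | some m =>
          obtain ⟨mv, mk⟩ := m
          rw [hP] at hmax; simp only [pvMaxStep] at hmax
          simp only [pvMaxStep]
          have hmk : mk < c + 1 := by
            split at hmax
            · rename_i hlt; omega
            · simp at hmax; omega
          rw [if_pos (show ((mv, mk) : Int × Int).2 < ((x, c + 1) : Int × Int).2 by simp; omega)]
      · have hstep : pvLoopS (rim, rxm, cm, ri, x, c) i x =
            (rim, rxm, cm, ri, x, c + 1) := by simp [pvLoopS, hgt]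
        rw [hstep]
        apply ih _ _ _ _ _ _ _ _ (by omega)
        cases hP : PySem.List.max? R' (fun p => p.2) with
        | none => rw [hP] at hmax; simp [pvMaxStep] at hmax; omega
        | some m =>
          obtain ⟨mv, mk⟩ := m
          rw [hP] at hmax; simp only [pvMaxStep] at hmax
          simp only [pvMaxStep]
          split at hmax
          · simp at hmax; omega
          · rename_i hngt
            simp at hmax
            obtain ⟨h1, h2⟩ := hmax
            rw [if_neg (show ¬((mv, mk) : Int × Int).2 < ((x, c + 1) : Int × Int).2 by simp; omega)]
            simp [h1, h2]
    · -- a new run starts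
      have hRS : plateauRunsStep (R' ++ [(rx, c)]) x = (R' ++ [(rx, c)]) ++ [(x, 1)] := by
        simp [plateauRunsStep]
        intro h; exact absurd h.symm hx
      have hstep : pvLoopS (rim, rxm, cm, ri, rx, c) i x =
          (rim, rxm, cm, i, x, 1) := by
        simp only [pvLoopS, if_neg hx]
        rw [if_neg (by simp; omega)]
      rw [hRS, hstep]
      apply ih _ _ _ _ _ _ _ _ le_rfl
      rw [pv_max?_append, hmax]
      simp only [pvMaxStep]
      rw [if_neg (by simp; omega)]

-- ===== VERDICT (by name: the statement is the Claim_ definition above) =====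
theorem plateau_spec : Claim_equal_plateau := by
  intro data _
  unfold Spec_plateau
  cases data with
  | nil => rfl
  | cons d rest =>
    show plateau (d :: rest) = plateau_alt (d :: rest)
    have hA : plateau (d :: rest)
        = some ((pvFoldIdx rest 1 (0, d, 1, 0, d, 1)).2.1) := by
      have hx0 : PySem.List.pyGetD (d :: rest) 0 0 = d := by
        rw [PySem.List.pyGetD_of_nonneg (d :: rest) 0 (le_refl 0)]
        rfl
      unfold plateau
      rw [if_neg (by simp)]
      simp only [hx0]
      rw [pv_bridge rest (d :: rest) 1 _ (by omega) rfl]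
    have hB : plateau_alt (d :: rest)
        = (PySem.List.max? (rest.foldl plateauRunsStep ([] ++ [(d, 1)]))
            (fun p => p.2)).map (fun r => r.1) := by
      simp only [plateau_alt, if_neg (List.cons_ne_nil d rest), List.foldl_cons]
      rfl
    rw [hA, hB, pv_main rest 1 0 0 d 1 d 1 [] le_rfl rfl]
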